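-- pv_equiv track=rewrite | github.com/Asabe041/AminSaber | Python Applications/University Assignments/a2/a2_part2_300059636.py | alienNumbersAgain
-- ===== SOURCE A (Python) =====
-- def alienNumbersAgain(s):
--     """
--     (str)->int
--     This function returns the sum of the values that aliens use as numbers, t=1024, y=598, !=121, a=42, N=6, U=1
--     """
--     total=0
--     for char in s:
--         if char in 'U':
--             total= total+1
--         if char in 'N':
--             total= total+6
--         if char in 'a':
--             total=total+42
--         if char in '!' :
--             total= total+121
--         if char in 'y' :
--             total= total+598
--         if char in 'T' :
--             total= total+1024
--         if char not in 'UNa!yT':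
--             total=total+0
--     return total
-- ===== SOURCE B (Python) =====
-- def alienNumbersAgain(s):
--     """
--     (str)->int
--     Tally the characters once, then sum value*count over the fixed alien mapping.
--     """
--     counts = {}
--     for ch in s:
--         counts[ch] = counts.get(ch, 0) + 1
--     values = {'U': 1, 'N': 6, 'a': 42, '!': 121, 'y': 598, 'T': 1024}
--     return sum(counts.get(ch, 0) * v for ch, v in values.items())
-- ===== Notes on version B (the rewrite author's own statement) =====
-- stated objective: alternative
-- what changed: B builds a frequency table of the string in one pass and then sums count*value over the six mapping entries, instead of scanning every character through seven membership branches.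
import Mathlib
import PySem

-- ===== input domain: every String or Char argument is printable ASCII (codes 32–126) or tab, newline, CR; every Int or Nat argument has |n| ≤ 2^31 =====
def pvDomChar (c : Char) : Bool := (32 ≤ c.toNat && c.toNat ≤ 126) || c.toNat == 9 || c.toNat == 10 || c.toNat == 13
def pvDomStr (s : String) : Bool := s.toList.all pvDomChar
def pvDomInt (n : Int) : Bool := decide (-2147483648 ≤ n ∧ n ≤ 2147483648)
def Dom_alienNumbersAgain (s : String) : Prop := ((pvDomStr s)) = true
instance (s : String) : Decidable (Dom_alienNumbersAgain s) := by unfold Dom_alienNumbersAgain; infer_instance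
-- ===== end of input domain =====

-- B replaces A's per-character seven-branch scan by a one-pass character tally followed by a sum over the six fixed mapping entries (alternative decomposition, same cost).


-- ===== PORT A =====
-- Literal transliteration of A: fold over the characters, seven membership branches in order.
def alienNumbersAgain (s : String) : Int :=
  s.toList.foldl (fun total char =>
    let total := if "U".toList.contains char then total + 1 else total
    let total := if "N".toList.contains char then total + 6 else total
    let total := if "a".toList.contains char then total + 42 else total
    let total := if "!".toList.contains char then total + 121 else total
    let total := if "y".toList.contains char then total + 598 else total
    let total := if "T".toList.contains char then total + 1024 else total
    let total := if !("UNa!yT".toList.contains char) then total + 0 else total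
    total) 0

-- ===== PORT B =====
-- B: one tally pass (dict of counts), then a pass over the six mapping entries.
def alienValues : List (Char × Int) := [('U', 1), ('N', 6), ('a', 42), ('!', 121), ('y', 598), ('T', 1024)]

def alienNumbersAgain_alt (s : String) : Int :=
  let counts : PySem.Dict Char Int :=
    s.toList.foldl (fun d ch => d.insert ch (d.getD ch 0 + 1)) PySem.Dict.empty
  (alienValues.map (fun kv => counts.getD kv.1 0 * kv.2)).sum

-- ===== PRECONDITION & SPEC =====
def Spec_alienNumbersAgain (s : String) (out : Int) : Prop := out = alienNumbersAgain_alt s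
instance (s : String) (out : Int) : Decidable (Spec_alienNumbersAgain s out) := by unfold Spec_alienNumbersAgain; infer_instance

-- ===== CLAIM (what is proved, stated in full; the proofs are below) =====
def Claim_equal_alienNumbersAgain : Prop := ∀ (s : String), Dom_alienNumbersAgain s → Spec_alienNumbersAgain s (alienNumbersAgain s)

-- ===== LEMMAS AND PROOFS =====

-- ===== VERDICT (by name: the statement is the Claim_ definition above) =====
lemma alienA_cons (c : Char) (l : List Char) (t : Int) :
    (let total := if "U".toList.contains c then t + 1 else t
     let total := if "N".toList.contains c then total + 6 else total
     let total := if "a".toList.contains c then total + 42 else total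
     let total := if "!".toList.contains c then total + 121 else total
     let total := if "y".toList.contains c then total + 598 else total
     let total := if "T".toList.contains c then total + 1024 else total
     let total := if !("UNa!yT".toList.contains c) then total + 0 else total
     total)
      + (l.count 'U' : Int) * 1 + (l.count 'N' : Int) * 6 + (l.count 'a' : Int) * 42
      + (l.count '!' : Int) * 121 + (l.count 'y' : Int) * 598 + (l.count 'T' : Int) * 1024
    = t + ((c :: l).count 'U' : Int) * 1 + ((c :: l).count 'N' : Int) * 6 + ((c :: l).count 'a' : Int) * 42
      + ((c :: l).count '!' : Int) * 121 + ((c :: l).count 'y' : Int) * 598 + ((c :: l).count 'T' : Int) * 1024 := by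
  simp only [List.count_cons, show "U".toList = ['U'] from rfl, show "N".toList = ['N'] from rfl,
    show "a".toList = ['a'] from rfl, show "!".toList = ['!'] from rfl,
    show "y".toList = ['y'] from rfl, show "T".toList = ['T'] from rfl,
    show "UNa!yT".toList = ['U','N','a','!','y','T'] from rfl,
    List.contains_cons, List.contains_nil, Bool.or_false, beq_iff_eq]
  push_cast
  by_cases hU : c = 'U' <;> by_cases hN : c = 'N' <;> by_cases ha : c = 'a' <;>
    by_cases hb : c = '!' <;> by_cases hy : c = 'y' <;> by_cases hT : c = 'T' <;>
    simp_all <;> ring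

lemma alienA_fold (l : List Char) (t : Int) :
    l.foldl (fun total char =>
      let total := if "U".toList.contains char then total + 1 else total
      let total := if "N".toList.contains char then total + 6 else total
      let total := if "a".toList.contains char then total + 42 else total
      let total := if "!".toList.contains char then total + 121 else total
      let total := if "y".toList.contains char then total + 598 else total
      let total := if "T".toList.contains char then total + 1024 else total
      let total := if !("UNa!yT".toList.contains char) then total + 0 else total
      total) t
    = t + (l.count 'U' : Int) * 1 + (l.count 'N' : Int) * 6 + (l.count 'a' : Int) * 42
        + (l.count '!' : Int) * 121 + (l.count 'y' : Int) * 598 + (l.count 'T' : Int) * 1024 := by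
  induction l generalizing t with
  | nil => simp
  | cons c l ih =>
    rw [List.foldl_cons, ih]
    exact alienA_cons c l t

theorem alienNumbersAgain_spec : Claim_equal_alienNumbersAgain := by
  intro s _
  unfold Spec_alienNumbersAgain alienNumbersAgain alienNumbersAgain_alt alienValues
  rw [alienA_fold]
  simp [PySem.Dict.getD_foldl_insert_add_one]
  ring
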